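-- pv_equiv track=rewrite | github.com/luyuancpp/mmorpg | tools/data_table_exporter/migrate_xlsx.py | _common_prefix_multi
-- ===== SOURCE A (Python) =====
-- def _common_prefix_multi(names: list[str]) -> str:
--     """Find common underscore-delimited prefix across multiple names."""
--     if not names:
--         return ""
--     parts_list = [n.split("_") for n in names]
--     min_len = min(len(p) for p in parts_list)
--     common = []
--     for i in range(min_len):
--         vals = {p[i] for p in parts_list}
--         if len(vals) == 1:
--             common.append(vals.pop())
--         else:
--             break
--     return "_".join(common)
-- ===== SOURCE B (Python) =====
-- def _common_prefix_multi(names: list[str]) -> str: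
--     """Find common underscore-delimited prefix across multiple names."""
--     if not names:
--         return ""
--     acc = names[0].split("_")
--     for n in names[1:]:
--         acc = _lcp_tokens(acc, n.split("_"))
--     return "_".join(acc)
--
--
-- def _lcp_tokens(a: list[str], b: list[str]) -> list[str]:
--     out = []
--     for x, y in zip(a, b):
--         if x != y:
--             break
--         out.append(x)
--     return out
-- ===== Notes on version B (the rewrite author's own statement) =====
-- stated objective: alternative
-- what changed: B replaces A's column-indexed scan (compute min token count, then build a set of each column's values until one has size > 1) by a left fold over the names that keeps a running token-prefix accumulator, intersecting it pairwise with each next name's token list via a zip-until-mismatch helper.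
import Mathlib
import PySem

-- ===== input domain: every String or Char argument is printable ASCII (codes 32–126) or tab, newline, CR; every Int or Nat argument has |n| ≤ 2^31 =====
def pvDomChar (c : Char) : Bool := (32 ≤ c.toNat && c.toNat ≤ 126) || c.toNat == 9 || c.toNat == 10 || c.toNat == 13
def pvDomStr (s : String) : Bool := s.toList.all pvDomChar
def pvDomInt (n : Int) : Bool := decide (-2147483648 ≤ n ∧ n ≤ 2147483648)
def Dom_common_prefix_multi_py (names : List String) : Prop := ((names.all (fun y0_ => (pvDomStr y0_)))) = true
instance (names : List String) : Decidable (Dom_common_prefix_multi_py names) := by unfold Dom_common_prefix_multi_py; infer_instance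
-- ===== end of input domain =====

-- B replaces A's column-indexed scan (min length, then a set per column) by a left fold that
-- intersects token lists pairwise; same result, a different pass shape (objective: alternative).

-- ===== PORT A =====
-- n.split("_"): sep "_" is non-empty, so Python's split never raises; split? is none only for an
-- empty sep, hence getD [] is never taken
def splitU (n : String) : List String := (PySem.Str.split? n "_").getD []

-- A's for-i-in-range(min_len) loop with break; `p.getD i ""` is Python's p[i], exact because the
-- loop only reads indices i < min_len ≤ |p|; `vals.pop()` is read as the sole element (headD),
-- exact because it is guarded by len(vals) == 1.
def aLoop (parts_list : List (List String)) (min_len : Nat) (i : Nat) (common : List String) :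
    List String :=
  if i < min_len then
    let vals := PySem.Set.ofList (parts_list.map (fun p => p.getD i ""))
    if PySem.Set.len vals = 1 then
      aLoop parts_list min_len (i + 1) (common ++ [vals.headD ""])
    else common
  else common
termination_by min_len - i

def common_prefix_multi_py (names : List String) : String :=
  if names = [] then ""
  else
    let parts_list := names.map (fun n => splitU n)
    -- min(len(p) for p in parts_list); getD 0 is never taken since names ≠ []
    let min_len := (PySem.List.min? (parts_list.map List.length) (fun x => x)).getD 0
    PySem.Str.join "_" (aLoop parts_list min_len 0 [])

-- ===== PORT B =====
-- Source B's _lcp_tokens: zip the two lists, stop at the first mismatch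
def lcpTokens : List String → List String → List String
  | x :: xs, y :: ys => if x = y then x :: lcpTokens xs ys else []
  | _, _ => []

def common_prefix_multi_py_alt (names : List String) : String :=
  match names with
  | [] => ""
  | n :: rest =>
      PySem.Str.join "_"
        (rest.foldl (fun acc m => lcpTokens acc (splitU m))
          (splitU n))

-- ===== PRECONDITION & SPEC =====
def Spec_common_prefix_multi_py (names : List String) (out : String) : Prop :=
  out = common_prefix_multi_py_alt names
instance (names : List String) (out : String) : Decidable (Spec_common_prefix_multi_py names out) := by
  unfold Spec_common_prefix_multi_py; infer_instance

-- ===== CLAIM (what is proved, stated in full; the proofs are below) =====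
def Claim_equal_common_prefix_multi_py : Prop :=
  ∀ (names : List String), Dom_common_prefix_multi_py names →
    Spec_common_prefix_multi_py names (common_prefix_multi_py names)

-- ===== LEMMAS AND PROOFS =====

-- the column-wise scan A performs, phrased structurally: emit the shared head while every list
-- agrees on it, on the tails thereafter
def colRec : List String → List (List String) → List String
  | [], _ => []
  | x :: xs, ps =>
      if ps.all (fun q => q.head? = some x) then x :: colRec xs (ps.map List.tail) else []

theorem lcpTokens_nil_left (b : List String) : lcpTokens [] b = [] := by
  cases b <;> rfl

theorem foldl_lcp_nil (ps : List (List String)) :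
    ps.foldl (fun acc m => lcpTokens acc m) [] = [] := by
  induction ps with
  | nil => rfl
  | cons q ps ih => simpa [lcpTokens_nil_left] using ih

theorem lcpTokens_prefix (a b : List String) : lcpTokens a b <+: a := by
  induction a generalizing b with
  | nil => simp [lcpTokens_nil_left]
  | cons x xs ih =>
      cases b with
      | nil => simp [lcpTokens]
      | cons y ys =>
          by_cases h : x = y
          · rw [lcpTokens, if_pos h]
            exact List.cons_prefix_cons.mpr ⟨rfl, ih ys⟩
          · simp [lcpTokens, h]

theorem foldl_lcp_all_heads (x : String) (ps : List (List String))
    (h : ∀ q ∈ ps, q.head? = some x) (xs : List String) :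
    ps.foldl (fun acc m => lcpTokens acc m) (x :: xs) =
      x :: (ps.map List.tail).foldl (fun acc m => lcpTokens acc m) xs := by
  induction ps generalizing xs with
  | nil => rfl
  | cons q ps ih =>
      obtain ⟨t, rfl⟩ : ∃ t, q = x :: t := by
        cases q with
        | nil => simp at h
        | cons y t => exact ⟨t, by have := h (y :: t) (by simp); simp_all⟩
      simp only [List.foldl_cons, List.map_cons, List.tail_cons]
      rw [show lcpTokens (x :: xs) (x :: t) = x :: lcpTokens xs t by simp [lcpTokens]]
      exact ih (fun q hq => h q (by simp [hq])) _

theorem foldl_lcp_bad (x : String) (xs : List String) (ps : List (List String))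
    (hbad : ∃ q ∈ ps, q.head? ≠ some x) (acc : List String) (hacc : acc <+: x :: xs) :
    ps.foldl (fun acc m => lcpTokens acc m) acc = [] := by
  induction ps generalizing acc with
  | nil => simp at hbad
  | cons q ps ih =>
      by_cases hq : q.head? = some x
      · obtain ⟨q', hq', hne⟩ := hbad
        rcases List.mem_cons.mp hq' with rfl | hmem
        · exact absurd hq hne
        · exact ih ⟨q', hmem, hne⟩ _ ((lcpTokens_prefix acc q).trans hacc)
      · have hz : lcpTokens acc q = [] := by
          rcases List.prefix_cons_iff.mp hacc with rfl | ⟨acc', rfl, _⟩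
          · exact lcpTokens_nil_left q
          · cases q with
            | nil => rfl
            | cons y ys =>
                have : x ≠ y := fun h => hq (by simp [h])
                simp [lcpTokens, this]
        rw [List.foldl_cons, hz]
        exact foldl_lcp_nil ps

theorem colRec_eq_foldl (p : List String) (ps : List (List String)) :
    colRec p ps = ps.foldl (fun acc m => lcpTokens acc m) p := by
  induction p generalizing ps with
  | nil => simp [colRec, foldl_lcp_nil]
  | cons x xs ih =>
      by_cases h : ps.all (fun q => q.head? = some x)
      · rw [colRec, if_pos h,
          foldl_lcp_all_heads x ps (by simpa [List.all_eq_true, decide_eq_true_iff] using h) xs,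
          ih]
      · rw [colRec, if_neg h,
          foldl_lcp_bad x xs ps ?_ (x :: xs) (List.prefix_refl _)]
        simp only [List.all_eq_true, decide_eq_true_iff, not_forall] at h
        obtain ⟨q, hq, hne⟩ := h
        exact ⟨q, hq, hne⟩

-- the single-column test of A: the set of the i-th entries has size 1 iff they are all equal
theorem set_len_one_iff (v : String) (l : List String) :
    PySem.Set.len (PySem.Set.ofList (v :: l)) = 1 ↔ ∀ y ∈ l, y = v := by
  rw [PySem.Set.ofList_cons]
  constructor
  · intro h y hy
    have hlen : (PySem.Set.discard (PySem.Set.ofList l) v).length = 0 := by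
      simpa [PySem.Set.len] using h
    have hnil := List.length_eq_zero_iff.mp hlen
    by_contra hne
    have : y ∈ PySem.Set.discard (PySem.Set.ofList l) v := by
      rw [PySem.Set.mem_discard]
      exact ⟨(PySem.Set.mem_ofList _ _).mpr hy, hne⟩
    simp [hnil] at this
  · intro h
    have : PySem.Set.discard (PySem.Set.ofList l) v = [] := by
      rw [List.eq_nil_iff_forall_not_mem]
      intro y hy
      rw [PySem.Set.mem_discard, PySem.Set.mem_ofList] at hy
      exact hy.2 (h y hy.1)
    simp [PySem.Set.len, this]

theorem drop_head?_eq (q : List String) (i : Nat) (h : i < q.length) :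
    (q.drop i).head? = some (q.getD i "") := by
  rw [List.getD_eq_getElem _ _ h, List.head?_drop]
  simp [List.getElem?_eq_getElem h]

-- A's indexed loop, related to the structural column scan
theorem aLoop_eq_colRec (p0 : List String) (ps : List (List String)) (M : Nat)
    (hlb : ∀ q ∈ p0 :: ps, M ≤ q.length) (hmem : ∃ q ∈ p0 :: ps, q.length = M) :
    ∀ i common, aLoop (p0 :: ps) M i common =
      common ++ colRec (p0.drop i) (ps.map (fun q => q.drop i)) := by
  intro i common
  induction hn : M - i using Nat.strong_induction_on generalizing i common with
  | _ n ih =>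
  by_cases hi : i < M
  · -- i < M : every list is longer than i
    have hall : ∀ q ∈ p0 :: ps, i < q.length := fun q hq => lt_of_lt_of_le hi (hlb q hq)
    have hp0 : i < p0.length := hall p0 (by simp)
    set v := p0.getD i "" with hv
    have hmap : (p0 :: ps).map (fun p => p.getD i "") = v :: ps.map (fun p => p.getD i "") := by
      simp [hv]
    rw [aLoop, if_pos hi]
    have hdrop : p0.drop i = v :: p0.drop (i + 1) := by
      rw [hv, List.getD_eq_getElem _ _ hp0]
      exact List.drop_eq_getElem_cons hp0
    by_cases hone : PySem.Set.len (PySem.Set.ofList ((p0 :: ps).map (fun p => p.getD i ""))) = 1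
    · -- all entries of column i agree; the head of the set is v
      have hallv : ∀ y ∈ ps.map (fun p => p.getD i ""), y = v := by
        rw [hmap] at hone
        exact (set_len_one_iff v _).mp hone
      have hhead :
          (PySem.Set.ofList ((p0 :: ps).map (fun p => p.getD i ""))).headD "" = v := by
        rw [hmap, PySem.Set.ofList_cons]; rfl
      simp only [hone, if_pos, hhead]
      rw [ih (M - (i + 1)) (by omega) (i + 1) (common ++ [v]) rfl]
      rw [hdrop, colRec]
      have hcond : (ps.map (fun q => q.drop i)).all (fun q => q.head? = some v) = true := by
        simp only [List.all_eq_true, List.mem_map, decide_eq_true_iff]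
        rintro _ ⟨q, hq, rfl⟩
        rw [drop_head?_eq q i (hall q (by simp [hq]))]
        exact congrArg some (hallv _ (List.mem_map.mpr ⟨q, hq, rfl⟩))
      rw [if_pos hcond]
      have htails : (ps.map (fun q => q.drop i)).map List.tail = ps.map (fun q => q.drop (i + 1)) := by
        simp [Function.comp, List.tail_drop]
      rw [htails]
      simp
    · -- a mismatch in column i: both sides stop here
      rw [if_neg hone]
      rw [hdrop, colRec]
      have hcond : ¬ ((ps.map (fun q => q.drop i)).all (fun q => q.head? = some v) = true) := by
        intro hcondT
        apply hone
        rw [hmap, set_len_one_iff v _]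
        intro y hy
        obtain ⟨q, hq, rfl⟩ := List.mem_map.mp hy
        have := (List.all_eq_true.mp hcondT) (q.drop i) (List.mem_map.mpr ⟨q, hq, rfl⟩)
        rw [drop_head?_eq q i (hall q (by simp [hq])), decide_eq_true_iff] at this
        exact Option.some.inj this
      rw [if_neg hcond]
      simp
  · -- i ≥ M : the loop stops; some list has been exhausted, so colRec yields []
    rw [aLoop, if_neg hi]
    obtain ⟨q, hq, hqM⟩ := hmem
    have hqlen : q.length ≤ i := by omega
    rcases List.mem_cons.mp hq with hq0 | hmem'
    · have : p0.drop i = [] := by rw [← hq0]; exact List.drop_eq_nil_of_le hqlen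
      simp [this, colRec]
    · cases hdp : p0.drop i with
      | nil => simp [colRec]
      | cons x xs =>
          rw [colRec]
          have hbad : ¬ ((ps.map (fun q' => q'.drop i)).all (fun q' => q'.head? = some x) = true) := by
            intro hT
            have := (List.all_eq_true.mp hT) (q.drop i) (List.mem_map.mpr ⟨q, hmem', rfl⟩)
            rw [List.drop_eq_nil_of_le hqlen] at this
            simp at this
          rw [if_neg hbad]
          simp

-- ===== VERDICT (by name: the statement is the Claim_ definition above) =====
theorem common_prefix_multi_py_spec : Claim_equal_common_prefix_multi_py := by
  intro names _
  unfold Spec_common_prefix_multi_py common_prefix_multi_py common_prefix_multi_py_alt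
  cases names with
  | nil => rfl
  | cons n rest =>
      simp only [List.map_cons, reduceCtorEq, if_false]
      set p0 := splitU n with hp0
      set ps := rest.map (fun m => splitU m) with hps
      set M := (PySem.List.min? ((p0 :: ps).map List.length) (fun x => x)).getD 0 with hM
      have hne : (p0 :: ps).map List.length ≠ [] := by simp
      obtain ⟨m, hm⟩ := Option.ne_none_iff_exists'.mp
        (fun h => hne ((PySem.List.min?_eq_none_iff ((p0 :: ps).map List.length) (fun x => x)).mp h))
      have hMm : M = m := by rw [hM, hm]; rfl
      have hmemLen := PySem.List.min?_mem hm
      have hisMin := PySem.List.min?_isMin hm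
      obtain ⟨q, hq, hqlen⟩ := List.mem_map.mp hmemLen
      have hlb : ∀ q' ∈ p0 :: ps, M ≤ q'.length := by
        intro q' hq'
        rw [hMm]
        exact hisMin _ (List.mem_map.mpr ⟨q', hq', rfl⟩)
      have hmem : ∃ q' ∈ p0 :: ps, q'.length = M := ⟨q, hq, by rw [hMm, hqlen]⟩
      simp only [← List.map_cons]
      rw [aLoop_eq_colRec p0 ps M hlb hmem 0 []]
      simp only [List.drop_zero, List.nil_append]
      rw [List.map_id', colRec_eq_foldl, hps, List.foldl_map]
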